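-- pv_equiv track=rewrite | github.com/yegeb/localhost-address-matching | data/synth/group_F2J_BIO_synth.py | _split_with_punct
-- ===== SOURCE A (Python) =====
-- from typing import List, Tuple, Dict, Optional
--
-- def _split_with_punct(text: str) -> List[str]:
--     out: List[str] = []
--     for token in text.split():
--         cur = ""
--         for ch in token:
--             if ch in ":/":
--                 if cur:
--                     out.append(cur); cur = ""
--                 out.append(ch)
--             else:
--                 cur += ch
--         if cur:
--             out.append(cur)
--     return out
-- ===== SOURCE B (Python) =====
-- from typing import List
--
-- def _split_with_punct(text: str) -> List[str]:
--     # pad each delimiter with spaces, then let str.split() do all the work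
--     return text.replace(":", " : ").replace("/", " / ").split()
-- ===== Notes on version B (the rewrite author's own statement) =====
-- stated objective: simpler
-- what changed: Replaced the two-level loop (text.split() plus a per-token character-accumulation scan) by two str.replace passes that pad each delimiter with spaces followed by a single str.split(), removing all explicit Python loops and accumulator state.
import Mathlib
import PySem

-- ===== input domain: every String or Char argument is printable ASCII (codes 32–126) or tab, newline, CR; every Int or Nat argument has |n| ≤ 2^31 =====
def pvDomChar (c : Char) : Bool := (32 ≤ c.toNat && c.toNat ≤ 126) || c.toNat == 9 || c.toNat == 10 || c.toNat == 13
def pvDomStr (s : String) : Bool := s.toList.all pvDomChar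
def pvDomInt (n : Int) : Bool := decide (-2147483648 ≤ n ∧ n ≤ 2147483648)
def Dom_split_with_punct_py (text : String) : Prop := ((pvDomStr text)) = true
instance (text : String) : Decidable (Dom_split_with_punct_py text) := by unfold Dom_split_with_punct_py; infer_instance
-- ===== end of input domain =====

-- B replaces A's two-level loop (split then per-token char scan) by padding ':' and '/'
-- with spaces via str.replace and a single str.split(); objective: simpler (and measured faster).


-- ===== PORT A =====
-- inner loop body of A: one character of the current token
def pvTokStep (st : List String × List Char) (ch : Char) : List String × List Char :=
  if ch = ':' ∨ ch = '/' then
    ((if st.2.isEmpty then st.1 else st.1 ++ [String.ofList st.2]) ++ [String.ofList [ch]], [])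
  else (st.1, st.2 ++ [ch])

-- A's per-token processing: inner char loop, then the trailing `if cur: out.append(cur)`
def pvProcTok (out : List String) (tok : String) : List String :=
  let st := tok.toList.foldl pvTokStep (out, [])
  if st.2.isEmpty then st.1 else st.1 ++ [String.ofList st.2]

def split_with_punct_py (text : String) : List String :=
  (PySem.Str.split₀ text).foldl pvProcTok []

-- ===== PORT B =====
def split_with_punct_py_alt (text : String) : List String :=
  PySem.Str.split₀ (PySem.Str.replace (PySem.Str.replace text ":" " : ") "/" " / ")

-- ===== PRECONDITION & SPEC =====
def Spec_split_with_punct_py (text : String) (out : List String) : Prop := out = split_with_punct_py_alt text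
instance (text : String) (out : List String) : Decidable (Spec_split_with_punct_py text out) := by unfold Spec_split_with_punct_py; infer_instance

-- ===== CLAIM (what is proved, stated in full; the proofs are below) =====
def Claim_equal_split_with_punct_py : Prop := ∀ (text : String), Dom_split_with_punct_py text → Spec_split_with_punct_py text (split_with_punct_py text)

-- ===== LEMMAS AND PROOFS =====

-- expansion of one character after both replaces
def pvExpand (c : Char) : List Char :=
  if c = ':' ∨ c = '/' then [' ', c, ' '] else [c]

-- char-level analogue of pvTokStep / pvProcTok
def pvCTokStep (st : List (List Char) × List Char) (ch : Char) : List (List Char) × List Char :=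
  if ch = ':' ∨ ch = '/' then
    ((if st.2.isEmpty then st.1 else st.1 ++ [st.2]) ++ [[ch]], [])
  else (st.1, st.2 ++ [ch])

def pvCFlush (st : List (List Char) × List Char) : List (List Char) :=
  if st.2.isEmpty then st.1 else st.1 ++ [st.2]

def pvCAFold (out : List (List Char)) (toks : List (List Char)) : List (List Char) :=
  toks.foldl (fun o t => pvCFlush (t.foldl pvCTokStep (o, []))) out

-- char-level single pass (whitespace flushes, delimiters flush and emit themselves)
def pvCStep (st : List (List Char) × List Char) (ch : Char) : List (List Char) × List Char :=
  if PySem.Chars.isspace ch then (pvCFlush st, [])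
  else if ch = ':' ∨ ch = '/' then (pvCFlush st ++ [[ch]], [])
  else (st.1, st.2 ++ [ch])

lemma replace_go_single (d : Char) (new : List Char) :
    ∀ (l : List Char) (fuel : Nat) (acc : List Char), l.length ≤ fuel →
    PySem.Chars.replace.go [d] new fuel l acc =
      acc.reverse ++ l.flatMap (fun c => if c = d then new else [c]) := by
  intro l
  induction l with
  | nil =>
      intro fuel acc _
      cases fuel <;> simp [PySem.Chars.replace.go]
  | cons c t ih =>
      intro fuel acc h
      cases fuel with
      | zero => simp at h
      | succ f =>
          simp only [PySem.Chars.replace.go]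
          simp only [List.length_cons] at h
          by_cases hc : c = d
          · subst hc
            have hp : [c].isPrefixOf (c :: t) = true := by simp [List.isPrefixOf]
            rw [hp]
            simp only [if_true, List.length_cons, List.length_nil, Nat.zero_add,
              List.drop_succ_cons, List.drop_zero]
            rw [ih f (new.reverse ++ acc) (by omega)]
            simp
          · have hp : [d].isPrefixOf (c :: t) = false := by
              simp [List.isPrefixOf]; exact fun h' => (hc h'.symm).elim
            rw [hp]
            simp only [Bool.false_eq_true, if_false]
            rw [ih f (c :: acc) (by omega)]
            simp [hc]

lemma replace_single (d : Char) (new : List Char) (l : List Char) :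
    PySem.Chars.replace l [d] new = l.flatMap (fun c => if c = d then new else [c]) := by
  simp only [PySem.Chars.replace, List.isEmpty_cons, Bool.false_eq_true, if_false]
  simpa using replace_go_single d new l l.length [] (le_refl _)

lemma replace_twice (l : List Char) :
    PySem.Chars.replace (PySem.Chars.replace l [':'] (' ' :: ':' :: [' '])) ['/'] (' ' :: '/' :: [' ']) =
      l.flatMap pvExpand := by
  rw [replace_single, replace_single]
  induction l with
  | nil => simp
  | cons c t ih =>
      simp only [List.flatMap_cons, List.flatMap_append, ih]
      congr 1
      by_cases h1 : c = ':'
      · subst h1; decide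
      · by_cases h2 : c = '/'
        · subst h2; decide
        · simp [pvExpand, h1, h2]

-- split₀.go over the expanded list equals the char-level single pass
lemma go_expand (l : List Char) : ∀ (cur : List Char) (acc : List (List Char)),
    PySem.Chars.split₀.go (l.flatMap pvExpand) cur acc =
      pvCFlush (l.foldl pvCStep (acc.reverse, cur.reverse)) := by
  induction l with
  | nil =>
      intro cur acc
      simp only [List.flatMap_nil, PySem.Chars.split₀.go, List.foldl_nil, pvCFlush]
      by_cases hc : cur = [] <;> simp [hc]
  | cons c t ih =>
      intro cur acc
      simp only [List.flatMap_cons, List.foldl_cons]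
      by_cases hsp : PySem.Chars.isspace c = true
      · have hd : ¬ (c = ':' ∨ c = '/') := by
          rintro (rfl | rfl) <;> simp [PySem.Chars.isspace] at hsp
        have he : pvExpand c = [c] := by simp [pvExpand, hd]
        rw [he]
        simp only [List.cons_append, List.nil_append, PySem.Chars.split₀.go, hsp, if_pos]
        have hstep : pvCStep (acc.reverse, cur.reverse) c = (pvCFlush (acc.reverse, cur.reverse), []) := by
          simp [pvCStep, hsp]
        rw [hstep]
        by_cases hc : cur = []
        · subst hc
          rw [ih [] acc]
          simp [pvCFlush]
        · rw [if_neg (by simpa using hc)]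
          rw [ih [] (cur.reverse :: acc)]
          simp [pvCFlush, List.isEmpty_iff, hc]
      · by_cases hd : c = ':' ∨ c = '/'
        · have he : pvExpand c = [' ', c, ' '] := by simp [pvExpand, hd]
          have hspc : PySem.Chars.isspace ' ' = true := by decide
          have hcns : PySem.Chars.isspace c = false := by simpa using hsp
          rw [he]
          simp only [List.cons_append, List.nil_append]
          rw [show PySem.Chars.split₀.go (' ' :: c :: ' ' :: t.flatMap pvExpand) cur acc =
              PySem.Chars.split₀.go (t.flatMap pvExpand) []
                ([c] :: (if cur.isEmpty then acc else cur.reverse :: acc)) from by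
            by_cases hc : cur = [] <;>
              simp [hc, PySem.Chars.split₀.go, hspc, hcns]]
          rw [ih [] ([c] :: (if cur.isEmpty then acc else cur.reverse :: acc))]
          have hstep : pvCStep (acc.reverse, cur.reverse) c =
              (pvCFlush (acc.reverse, cur.reverse) ++ [[c]], []) := by
            simp [pvCStep, hcns, hd]
          rw [hstep]
          by_cases hc : cur = [] <;> simp [hc, pvCFlush, List.isEmpty_iff]
        · have he : pvExpand c = [c] := by simp [pvExpand, hd]
          rw [he]
          simp only [List.cons_append, List.nil_append, PySem.Chars.split₀.go, hsp,
            Bool.false_eq_true, if_false]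
          rw [ih (c :: cur) acc]
          have hstep : pvCStep (acc.reverse, cur.reverse) c = (acc.reverse, cur.reverse ++ [c]) := by
            simp [pvCStep, hsp, hd]
          rw [hstep]
          simp

lemma go_acc (s cur acc) :
    PySem.Chars.split₀.go s cur acc = acc.reverse ++ PySem.Chars.split₀.go s cur [] := by
  induction s generalizing cur acc with
  | nil => simp only [PySem.Chars.split₀.go]; split <;> simp
  | cons ch rest ih =>
      simp only [PySem.Chars.split₀.go]
      split
      · split
        · exact ih _ _
        · rw [ih _ [cur.reverse], ih _ (cur.reverse :: acc)]; simp
      · exact ih _ _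

-- A's single-pass reformulation: the inner token fold over split₀ tokens, char level
lemma ctok_append (c : List Char) (ch : Char) (out : List (List Char)) :
    pvCTokStep (c.foldl pvCTokStep (out, [])) ch = (c ++ [ch]).foldl pvCTokStep (out, []) := by
  simp

lemma cmain (s : List Char) : ∀ (c : List Char) (out : List (List Char)),
    pvCFlush (s.foldl pvCStep (c.foldl pvCTokStep (out, []))) =
      pvCAFold out (PySem.Chars.split₀.go s c.reverse []) := by
  induction s with
  | nil =>
      intro c out
      simp only [List.foldl_nil, PySem.Chars.split₀.go]
      by_cases hc : c = []
      · simp [hc, pvCAFold, pvCFlush]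
      · simp [List.isEmpty_iff, hc, pvCAFold, pvCFlush]
  | cons ch rest ih =>
      intro c out
      simp only [List.foldl_cons, PySem.Chars.split₀.go]
      by_cases hsp : PySem.Chars.isspace ch = true
      · have hb : pvCStep (c.foldl pvCTokStep (out, [])) ch =
            (pvCFlush (c.foldl pvCTokStep (out, [])), []) := by
          simp [pvCStep, hsp]
        rw [hb]
        have := ih [] (pvCFlush (c.foldl pvCTokStep (out, [])))
        simp only [List.foldl_nil, List.reverse_nil] at this
        rw [this]
        by_cases hc : c = []
        · simp [hsp, hc, pvCFlush]
        · simp only [hsp, List.isEmpty_iff, List.reverse_eq_nil_iff, hc, if_pos]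
          rw [go_acc rest [] [c.reverse.reverse]]
          simp [pvCAFold, pvCFlush, List.isEmpty_iff]
      · have hb : pvCStep (c.foldl pvCTokStep (out, [])) ch =
            pvCTokStep (c.foldl pvCTokStep (out, [])) ch := by
          by_cases hd : ch = ':' ∨ ch = '/' <;> simp [pvCStep, pvCTokStep, hsp, hd, pvCFlush]
        rw [hb, ctok_append, ih (c ++ [ch]) out]
        simp [hsp]

-- A's string fold is the char-level fold under String.ofList
lemma tok_map (t : List Char) : ∀ (out : List (List Char)) (cur : List Char),
    t.foldl pvTokStep (out.map String.ofList, cur) =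
      ((t.foldl pvCTokStep (out, cur)).1.map String.ofList, (t.foldl pvCTokStep (out, cur)).2) := by
  induction t with
  | nil => intro out cur; rfl
  | cons ch rest ih =>
      intro out cur
      simp only [List.foldl_cons]
      by_cases hd : ch = ':' ∨ ch = '/'
      · by_cases hc : cur = []
        · rw [show pvTokStep (out.map String.ofList, cur) ch =
              ((out ++ [[ch]]).map String.ofList, []) from by simp [pvTokStep, hd, hc]]
          rw [show pvCTokStep (out, cur) ch = (out ++ [[ch]], []) from by simp [pvCTokStep, hd, hc]]
          exact ih _ _
        · rw [show pvTokStep (out.map String.ofList, cur) ch =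
              ((out ++ [cur] ++ [[ch]]).map String.ofList, []) from by
            simp [pvTokStep, hd, List.isEmpty_iff, hc]]
          rw [show pvCTokStep (out, cur) ch = (out ++ [cur] ++ [[ch]], []) from by
            simp [pvCTokStep, hd, List.isEmpty_iff, hc]]
          exact ih _ _
      · rw [show pvTokStep (out.map String.ofList, cur) ch =
            (out.map String.ofList, cur ++ [ch]) from by simp [pvTokStep, hd]]
        rw [show pvCTokStep (out, cur) ch = (out, cur ++ [ch]) from by simp [pvCTokStep, hd]]
        exact ih _ _

lemma afold_map (toks : List (List Char)) : ∀ (out : List (List Char)),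
    (toks.map String.ofList).foldl pvProcTok (out.map String.ofList) =
      (pvCAFold out toks).map String.ofList := by
  induction toks with
  | nil => intro out; rfl
  | cons t ts ih =>
      intro out
      simp only [List.map_cons, List.foldl_cons, pvCAFold] at *
      rw [show pvProcTok (out.map String.ofList) (String.ofList t) =
          (pvCFlush (t.foldl pvCTokStep (out, []))).map String.ofList from by
        simp only [pvProcTok, pvCFlush]
        rw [show (String.ofList t).toList = t by simp, tok_map t out []]
        by_cases h : (t.foldl pvCTokStep (out, [])).2 = [] <;>
          simp [List.isEmpty_iff, h]]
      exact ih _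

-- ===== VERDICT (by name: the statement is the Claim_ definition above) =====
theorem split_with_punct_py_spec : Claim_equal_split_with_punct_py := by
  intro text _
  unfold Spec_split_with_punct_py split_with_punct_py split_with_punct_py_alt
  have h1 : (PySem.Str.replace (PySem.Str.replace text ":" " : ") "/" " / ").toList
      = text.toList.flatMap pvExpand := by
    rw [PySem.Str.toList_replace, PySem.Str.toList_replace]
    rw [show (String.toList ":") = [':'] from rfl, show (String.toList "/") = ['/'] from rfl,
       show (String.toList " : ") = (' ' :: ':' :: [' ']) from rfl,
       show (String.toList " / ") = (' ' :: '/' :: [' ']) from rfl]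
    exact replace_twice text.toList
  have hM := cmain text.toList [] []
  simp only [List.foldl_nil, List.reverse_nil] at hM
  calc (PySem.Str.split₀ text).foldl pvProcTok []
      = (pvCAFold [] (PySem.Chars.split₀ text.toList)).map String.ofList := by
        have h := afold_map (PySem.Chars.split₀ text.toList) []
        simpa [PySem.Str.split₀] using h
    _ = (pvCFlush (text.toList.foldl pvCStep ([], []))).map String.ofList := by
        rw [PySem.Chars.split₀, ← hM]
    _ = PySem.Str.split₀ (PySem.Str.replace (PySem.Str.replace text ":" " : ") "/" " / ") := by
        rw [PySem.Str.split₀, h1, PySem.Chars.split₀, go_expand text.toList [] []]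
        simp
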